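-- pv_equiv track=rewrite | github.com/felisaga/bingo | src/bingo.py | nros_repetidos
-- ===== SOURCE A (Python) =====
-- def nros_repetidos(carton):
--     bandera = [0] * 100
--     for fila in range(3):
--         for columna in range(9):
--             if carton[fila][columna] > 0 and carton[fila][columna] <= 90:
--                 if bandera[carton[fila][columna]] != 0:
--                     return False
--                 bandera[carton[fila][columna]] = bandera[carton[fila][columna]] + 1
--     return True
-- ===== SOURCE B (Python) =====
-- def nros_repetidos(carton):
--     for i in range(27):
--         v = carton[i // 9][i % 9]
--         if 0 < v <= 90:
--             for j in range(i):
--                 w = carton[j // 9][j % 9]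
--                 if 0 < w <= 90 and w == v:
--                     return False
--     return True
-- ===== Notes on version B (the rewrite author's own statement) =====
-- stated objective: alternative
-- what changed: Replaces A's auxiliary 100-slot flag array (mark each valid number, bail when its flag is already set) by a stateless brute-force pairwise check: a flat loop over the 27 cell indices whose inner loop re-reads every earlier cell of the card and returns False on the first match, so no marking structure is maintained at all.
import Mathlib
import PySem

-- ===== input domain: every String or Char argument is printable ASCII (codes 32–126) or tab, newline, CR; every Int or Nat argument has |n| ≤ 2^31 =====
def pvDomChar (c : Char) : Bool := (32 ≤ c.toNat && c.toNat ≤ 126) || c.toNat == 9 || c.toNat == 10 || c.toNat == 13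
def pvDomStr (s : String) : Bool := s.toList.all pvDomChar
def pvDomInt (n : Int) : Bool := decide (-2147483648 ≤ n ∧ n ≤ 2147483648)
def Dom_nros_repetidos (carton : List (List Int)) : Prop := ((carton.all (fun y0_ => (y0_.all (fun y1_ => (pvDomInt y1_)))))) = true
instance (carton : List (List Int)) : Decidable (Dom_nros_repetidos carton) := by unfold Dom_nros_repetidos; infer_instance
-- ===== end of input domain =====

-- B keeps no marking structure at all: a flat loop over the 27 cell indices whose inner loop
-- re-reads every earlier cell and returns False on the first match, instead of A's incrementally
-- marked 100-slot flag array.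

-- ===== PORT A =====
-- A's nested 'for fila in range(3): for columna in range(9)' with the early 'return False',
-- recursing over the flattened (fila, columna) index pairs with the bandera list as state.
def nrosAGo (carton : List (List Int)) : List (Int × Int) → List Int → Bool
  | [], _ => true
  | (f, c) :: rest, bandera =>
    let v := PySem.List.pyGetD (PySem.List.pyGetD carton f []) c 0
    if v > 0 ∧ v ≤ 90 then
      if PySem.List.pyGetD bandera v 0 ≠ 0 then false
      else nrosAGo carton rest (PySem.List.pySetD bandera v (PySem.List.pyGetD bandera v 0 + 1))
    else nrosAGo carton rest bandera

def nros_repetidos (carton : List (List Int)) : Bool :=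
  nrosAGo carton
    ((PySem.List.pyRange 0 3 1).flatMap (fun f => (PySem.List.pyRange 0 9 1).map (fun c => (f, c))))
    (List.replicate 100 0)

-- ===== PORT B =====
-- B's flat 'for i in range(27)' with divmod indexing; the inner 'for j in range(i)' with its early
-- 'return False' is the any over range(i).
def nrosBGo (carton : List (List Int)) : List Int → Bool
  | [] => true
  | i :: rest =>
    let v := PySem.List.pyGetD
      (PySem.List.pyGetD carton (PySem.Int.floordiv i 9) []) (PySem.Int.mod i 9) 0
    if 0 < v ∧ v ≤ 90 then
      if (PySem.List.pyRange 0 i 1).any (fun j =>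
          let w := PySem.List.pyGetD
            (PySem.List.pyGetD carton (PySem.Int.floordiv j 9) []) (PySem.Int.mod j 9) 0
          decide (0 < w ∧ w ≤ 90 ∧ w = v)) then false
      else nrosBGo carton rest
    else nrosBGo carton rest

def nros_repetidos_alt (carton : List (List Int)) : Bool :=
  nrosBGo carton (PySem.List.pyRange 0 27 1)

-- ===== PRECONDITION & SPEC =====
-- the cells Python A (and B) scans before its first missing cell (first short/absent row among the first 3)
def pvScanned (carton : List (List Int)) : List Int :=
  match (List.range 3).find? (fun j => decide (carton.length ≤ j ∨ (carton[j]?.getD []).length < 9)) with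
  | none => (carton.take 3).flatMap (fun r => r.take 9)
  | some j => (carton.take j).flatMap (fun r => r.take 9) ++ carton[j]?.getD []

-- Pre_ is exactly where Python A returns (elsewhere it raises IndexError, and so does B): a complete
-- 3×9 grid, or a ragged grid where a valid number repeats among the cells scanned before the first
-- missing cell (A hits 'return False' before the IndexError).
def Pre_nros_repetidos (carton : List (List Int)) : Prop :=
  (3 ≤ carton.length ∧ ∀ row ∈ carton.take 3, 9 ≤ row.length) ∨
  ¬ ((pvScanned carton).filter (fun v => decide (v > 0 ∧ v ≤ 90))).Nodup
instance (carton : List (List Int)) : Decidable (Pre_nros_repetidos carton) := by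
  unfold Pre_nros_repetidos; infer_instance

def pvWitness_nros_repetidos : List (List Int) :=
  [[1, 2, 3, 4, 5, 6, 7, 8, 9],
   [11, 12, 13, 14, 15, 16, 17, 18, 19],
   [21, 22, 23, 24, 25, 26, 27, 28, 29]]

def Spec_nros_repetidos (carton : List (List Int)) (out : Bool) : Prop := out = nros_repetidos_alt carton
instance (carton : List (List Int)) (out : Bool) : Decidable (Spec_nros_repetidos carton out) := by unfold Spec_nros_repetidos; infer_instance

-- ===== CLAIM (what is proved, stated in full; the proofs are below) =====
def Claim_equal_nros_repetidos : Prop := ∀ (carton : List (List Int)), Dom_nros_repetidos carton → Pre_nros_repetidos carton → Spec_nros_repetidos carton (nros_repetidos carton)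

-- ===== LEMMAS AND PROOFS =====

-- the list of valid numbers A's loop visits over a list of index pairs
def pvVals (carton : List (List Int)) (pairs : List (Int × Int)) : List Int :=
  pairs.filterMap (fun fc =>
    let v := PySem.List.pyGetD (PySem.List.pyGetD carton fc.1 []) fc.2 0
    if v > 0 ∧ v ≤ 90 then some v else none)

-- A's loop invariant: bandera (length 100) marks exactly the in-range values already seen.
lemma nrosAGo_eq (carton : List (List Int)) :
    ∀ (pairs : List (Int × Int)) (bandera seen : List Int),
      bandera.length = 100 → seen.Nodup →
      (∀ v : Int, 0 < v → v ≤ 90 → (PySem.List.pyGetD bandera v 0 ≠ 0 ↔ v ∈ seen)) →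
      nrosAGo carton pairs bandera = decide ((seen ++ pvVals carton pairs).Nodup) := by
  intro pairs
  induction pairs with
  | nil =>
    intro bandera seen _ hnd _
    simp [nrosAGo, pvVals, hnd]
  | cons fc rest ih =>
    intro bandera seen hlen hnd hiff
    obtain ⟨f, c⟩ := fc
    simp only [nrosAGo, pvVals, List.filterMap_cons]
    by_cases hg : PySem.List.pyGetD (PySem.List.pyGetD carton f []) c 0 > 0 ∧
        PySem.List.pyGetD (PySem.List.pyGetD carton f []) c 0 ≤ 90
    · set v := PySem.List.pyGetD (PySem.List.pyGetD carton f []) c 0 with hv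
      simp only [if_pos hg]
      by_cases hseen : v ∈ seen
      · have hflag : PySem.List.pyGetD bandera v 0 ≠ 0 := (hiff v hg.1 hg.2).mpr hseen
        rw [if_pos hflag]
        symm
        rw [decide_eq_false_iff_not]
        intro h
        rw [List.nodup_append] at h
        exact h.2.2 v hseen v List.mem_cons_self rfl
      · have hb0 : PySem.List.pyGetD bandera v 0 = 0 := by
          by_contra h; exact hseen ((hiff v hg.1 hg.2).mp h)
        have hvnat : ((v.toNat : Nat) : Int) = v := by omega
        have hlt : v.toNat < bandera.length := by omega
        rw [if_neg (by simp [hb0])]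
        rw [ih _ (seen ++ [v])
            (by rw [← hvnat]; simp [hlen])
            (by
              rw [List.nodup_append]
              refine ⟨hnd, List.nodup_singleton v, ?_⟩
              intro a ha b hb hab
              rw [List.mem_singleton] at hb
              exact hseen ((hab.trans hb) ▸ ha))
            (by
              intro w hw0 hw90
              have hwnat : ((w.toNat : Nat) : Int) = w := by omega
              rw [← hvnat, ← hwnat, PySem.List.pyGetD_pySetD_natCast bandera v.toNat w.toNat _ _ hlt]
              by_cases hwv : w.toNat = v.toNat
              · have : w = v := by omega
                simp [hb0, this, hvnat]
              · have hne : w ≠ v := by omega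
                rw [if_neg hwv, hwnat]
                simp [hiff w hw0 hw90, hvnat, hne])]
        rw [List.append_assoc]
        rfl
    · rw [if_neg hg]
      have := ih bandera seen hlen hnd hiff
      simp only [hg, if_false] at this ⊢
      simpa using this

-- the value Python reads at flat cell index i
def pvCell (carton : List (List Int)) (i : Int) : Int :=
  PySem.List.pyGetD (PySem.List.pyGetD carton (PySem.Int.floordiv i 9) []) (PySem.Int.mod i 9) 0

-- the valid numbers among the cells with flat index in [a, b)
def pvValsTo (carton : List (List Int)) (a b : Int) : List Int :=
  (PySem.List.pyRange a b 1).filterMap (fun i =>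
    if 0 < pvCell carton i ∧ pvCell carton i ≤ 90 then some (pvCell carton i) else none)

lemma pvValsTo_split (carton : List (List Int)) (a m b : Int) (h1 : a ≤ m) (h2 : m ≤ b) :
    pvValsTo carton a b = pvValsTo carton a m ++ pvValsTo carton m b := by
  unfold pvValsTo
  rw [PySem.List.pyRange_one_append a m b h1 h2, List.filterMap_append]

-- B's inner scan over range(i) finds a match iff v already occurred among the earlier valid cells
lemma inner_eq (carton : List (List Int)) (k v : Int) :
    ((PySem.List.pyRange 0 k 1).any (fun j =>
        let w := PySem.List.pyGetD
          (PySem.List.pyGetD carton (PySem.Int.floordiv j 9) []) (PySem.Int.mod j 9) 0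
        decide (0 < w ∧ w ≤ 90 ∧ w = v))) = decide (v ∈ pvValsTo carton 0 k) := by
  rw [Bool.eq_iff_iff, List.any_eq_true, decide_eq_true_iff]
  unfold pvValsTo
  simp only [List.mem_filterMap]
  constructor
  · rintro ⟨j, hj, hg⟩
    rw [decide_eq_true_iff] at hg
    exact ⟨j, hj, by rw [if_pos (⟨hg.1, hg.2.1⟩ : 0 < pvCell carton j ∧ pvCell carton j ≤ 90)]
                     exact congrArg some hg.2.2⟩
  · rintro ⟨j, hj, hf⟩
    by_cases hg : 0 < pvCell carton j ∧ pvCell carton j ≤ 90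
    · rw [if_pos hg] at hf
      exact ⟨j, hj, by rw [decide_eq_true_iff]
                       exact ⟨hg.1, hg.2, Option.some_injective _ hf⟩⟩
    · rw [if_neg hg] at hf
      cases hf

-- B's loop invariant: at index k with the earlier valid values duplicate-free, the remaining scan
-- decides duplicate-freeness of the whole prefix
lemma nrosBGo_eq (carton : List (List Int)) :
    ∀ (n : Nat) (k : Int), 0 ≤ k → (pvValsTo carton 0 k).Nodup →
      nrosBGo carton (PySem.List.pyRange k (k + (n : Int)) 1) =
        decide ((pvValsTo carton 0 (k + (n : Int))).Nodup) := by
  intro n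
  induction n with
  | zero =>
    intro k _ hnd
    rw [PySem.List.pyRange_one_eq_nil (by omega)]
    simpa [nrosBGo] using hnd
  | succ n ih =>
    intro k hk hnd
    have hlt : k < k + ((n + 1 : Nat) : Int) := by push_cast; omega
    rw [PySem.List.pyRange_one_cons hlt]
    simp only [nrosBGo, inner_eq]
    have hcell : PySem.List.pyGetD
        (PySem.List.pyGetD carton (PySem.Int.floordiv k 9) []) (PySem.Int.mod k 9) 0 =
        pvCell carton k := rfl
    rw [hcell]
    have hone : pvValsTo carton k (k + 1) =
        if 0 < pvCell carton k ∧ pvCell carton k ≤ 90 then [pvCell carton k] else [] := by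
      unfold pvValsTo
      rw [PySem.List.pyRange_one_singleton]
      by_cases hg : 0 < pvCell carton k ∧ pvCell carton k ≤ 90 <;> simp [hg]
    have hstep : k + ((n + 1 : Nat) : Int) = (k + 1) + (n : Int) := by push_cast; ring
    by_cases hg : 0 < pvCell carton k ∧ pvCell carton k ≤ 90
    · rw [if_pos hg]
      by_cases hmem : pvCell carton k ∈ pvValsTo carton 0 k
      · rw [if_pos (by rw [decide_eq_true_iff]; exact hmem)]
        symm
        rw [decide_eq_false_iff_not]
        intro h
        rw [pvValsTo_split carton 0 (k + 1) (k + ((n + 1 : Nat) : Int))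
              (by omega) (by push_cast; omega),
            pvValsTo_split carton 0 k (k + 1) (by omega) (by omega),
            hone, if_pos hg, List.append_assoc, List.nodup_append] at h
        exact h.2.2 _ hmem _ (by simp) rfl
      · rw [if_neg (by simp [hmem])]
        have hnd' : (pvValsTo carton 0 (k + 1)).Nodup := by
          rw [pvValsTo_split carton 0 k (k + 1) (by omega) (by omega), hone, if_pos hg,
            List.nodup_append]
          refine ⟨hnd, List.nodup_singleton _, ?_⟩
          intro a ha b hb hab
          rw [List.mem_singleton] at hb
          exact hmem ((hab.trans hb) ▸ ha)
        rw [hstep]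
        exact ih (k + 1) (by omega) hnd'
    · rw [if_neg hg]
      have hnd' : (pvValsTo carton 0 (k + 1)).Nodup := by
        rw [pvValsTo_split carton 0 k (k + 1) (by omega) (by omega), hone, if_neg hg,
          List.append_nil]
        exact hnd
      rw [hstep]
      exact ih (k + 1) (by omega) hnd'

-- ===== VERDICT (by name: the statement is the Claim_ definition above) =====
theorem nros_repetidos_spec : Claim_equal_nros_repetidos := by
  intro carton _ _
  unfold Spec_nros_repetidos nros_repetidos nros_repetidos_alt
  rw [nrosAGo_eq carton _ _ [] (by simp) (by simp)
      (by intro v hv0 hv90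
          have h : ((v.toNat : Nat) : Int) = v := by omega
          rw [← h, PySem.List.pyGetD_natCast]
          have h2 : (List.replicate 100 (0:Int))[v.toNat]? = some 0 := by
            rw [List.getElem?_replicate]
            simp [show v.toNat < 100 by omega]
          rw [List.getD_eq_getElem?_getD, h2]
          simp)]
  have hb := nrosBGo_eq carton 27 0 (by norm_num) (by
    unfold pvValsTo
    rw [PySem.List.pyRange_one_eq_nil (by omega)]
    simp)
  rw [show (0 : Int) + ((27 : Nat) : Int) = 27 by norm_num] at hb
  rw [hb, List.nil_append]
  have hidx : (PySem.List.pyRange 0 3 1).flatMap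
      (fun f => (PySem.List.pyRange 0 9 1).map (fun c => (f, c))) =
      (PySem.List.pyRange 0 27 1).map
        (fun i => (PySem.Int.floordiv i 9, PySem.Int.mod i 9)) := by decide
  rw [show pvVals carton ((PySem.List.pyRange 0 3 1).flatMap
      (fun f => (PySem.List.pyRange 0 9 1).map (fun c => (f, c)))) = pvValsTo carton 0 27 from by
    rw [pvVals, hidx, List.filterMap_map]
    rfl]
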